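-- pv_equiv track=rewrite | github.com/pypi-data/pypi-mirror-385 | packages/SnapQRpy/snapqrpy-0.2.0-py3-none-any.whl/qr/advanced/engineering_qr.py | _calculate_optimal_version
-- ===== SOURCE A (Python) =====
-- def _calculate_optimal_version(data: str) -> int:
--     """حساب نسخة QR المثلى حسب حجم البيانات"""
--     data_length = len(data)
--
--     capacity_table = {
--         1: 25, 2: 47, 3: 77, 4: 114, 5: 154,
--         6: 195, 7: 224, 8: 279, 9: 335, 10: 395
--     }
--
--     for version, capacity in capacity_table.items():
--         if data_length <= capacity:
--             return version
--
--     return 10  # أعلى نسخة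
-- ===== SOURCE B (Python) =====
-- import bisect
--
-- _CAPS = [25, 47, 77, 114, 154, 195, 224, 279, 335, 395]
--
-- def _calculate_optimal_version(data: str) -> int:
--     return min(bisect.bisect_left(_CAPS, len(data)) + 1, 10)
-- ===== Notes on version B (the rewrite author's own statement) =====
-- stated objective: idiomatic
-- what changed: Replaces the linear scan over the capacity dict with a binary search (bisect_left) on a sorted capacity array, clamping to version 10.
import Mathlib
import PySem

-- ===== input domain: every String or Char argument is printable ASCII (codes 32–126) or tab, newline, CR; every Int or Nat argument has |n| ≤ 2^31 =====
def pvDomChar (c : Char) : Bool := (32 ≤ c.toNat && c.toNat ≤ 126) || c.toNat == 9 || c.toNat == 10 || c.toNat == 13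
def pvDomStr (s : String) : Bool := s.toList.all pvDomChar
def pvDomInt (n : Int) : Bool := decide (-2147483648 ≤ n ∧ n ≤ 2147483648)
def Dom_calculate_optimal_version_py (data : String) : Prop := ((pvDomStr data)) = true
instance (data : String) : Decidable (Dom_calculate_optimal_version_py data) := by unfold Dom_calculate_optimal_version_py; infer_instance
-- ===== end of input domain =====

-- B replaces A's linear scan over the capacity dict with a binary search (bisect_left) over the sorted capacity array, clamped to version 10 (idiomatic; same exact values).


-- ===== PORT A =====
-- loop over capacity_table.items() with early return, as structural recursion
def pvScanA : List (Int × Int) → Int → Int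
  | [], _ => 10
  | (version, capacity) :: rest, n =>
      if n ≤ capacity then version else pvScanA rest n

def calculate_optimal_version_py (data : String) : Int :=
  let data_length := PySem.Str.len data
  let capacity_table : List (Int × Int) :=
    [(1, 25), (2, 47), (3, 77), (4, 114), (5, 154),
     (6, 195), (7, 224), (8, 279), (9, 335), (10, 395)]
  pvScanA capacity_table data_length

-- ===== PORT B =====
def pvCaps : List Int := [25, 47, 77, 114, 154, 195, 224, 279, 335, 395]

-- bisect.bisect_left(caps, x) on lo..hi; the fuel parameter (hi - lo, which strictly
-- decreases each iteration) only makes the recursion structural, it never changes the result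
def pvBisectLeftAux : Nat → List Int → Int → Nat → Nat → Nat
  | 0, _, _, lo, _ => lo
  | fuel + 1, caps, x, lo, hi =>
      if lo < hi then
        if caps.getD ((lo + hi) / 2) 0 < x then
          pvBisectLeftAux fuel caps x ((lo + hi) / 2 + 1) hi
        else
          pvBisectLeftAux fuel caps x lo ((lo + hi) / 2)
      else lo

def pvBisectLeft (caps : List Int) (x : Int) (lo hi : Nat) : Nat :=
  pvBisectLeftAux (hi - lo) caps x lo hi

def calculate_optimal_version_py_alt (data : String) : Int :=
  min ((pvBisectLeft pvCaps (PySem.Str.len data) 0 pvCaps.length : Int) + 1) 10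

-- ===== PRECONDITION & SPEC =====
def Spec_calculate_optimal_version_py (data : String) (out : Int) : Prop := out = calculate_optimal_version_py_alt data
instance (data : String) (out : Int) : Decidable (Spec_calculate_optimal_version_py data out) := by unfold Spec_calculate_optimal_version_py; infer_instance

-- ===== CLAIM (what is proved, stated in full; the proofs are below) =====
def Claim_equal_calculate_optimal_version_py : Prop := ∀ (data : String), Dom_calculate_optimal_version_py data → Spec_calculate_optimal_version_py data (calculate_optimal_version_py data)

-- ===== LEMMAS AND PROOFS =====

-- ===== VERDICT (by name: the statement is the Claim_ definition above) =====
theorem pvAux_congr (f : Nat) : ∀ (g : Nat) (caps : List Int) (x : Int) (lo hi : Nat),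
    hi - lo ≤ f → hi - lo ≤ g →
    pvBisectLeftAux f caps x lo hi = pvBisectLeftAux g caps x lo hi := by
  induction f with
  | zero =>
    intro g caps x lo hi hf hg
    cases g with
    | zero => rfl
    | succ g => rw [pvBisectLeftAux, pvBisectLeftAux, if_neg (by omega)]
  | succ f ih =>
    intro g caps x lo hi hf hg
    cases g with
    | zero => rw [pvBisectLeftAux, pvBisectLeftAux, if_neg (by omega)]
    | succ g =>
      rw [pvBisectLeftAux, pvBisectLeftAux]
      by_cases h : lo < hi
      · rw [if_pos h, if_pos h]
        by_cases hc : caps.getD ((lo + hi) / 2) 0 < x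
        · rw [if_pos hc, if_pos hc]; exact ih g caps x _ hi (by omega) (by omega)
        · rw [if_neg hc, if_neg hc]; exact ih g caps x lo _ (by omega) (by omega)
      · rw [if_neg h, if_neg h]

theorem pvBisect_step (caps : List Int) (x : Int) (lo hi : Nat) (h : lo < hi) :
    pvBisectLeft caps x lo hi =
      (if caps.getD ((lo + hi) / 2) 0 < x then pvBisectLeft caps x ((lo + hi) / 2 + 1) hi
       else pvBisectLeft caps x lo ((lo + hi) / 2)) := by
  unfold pvBisectLeft
  rw [pvAux_congr (hi - lo) ((hi - lo - 1) + 1) caps x lo hi (le_refl _) (by omega),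
      pvBisectLeftAux, if_pos h]
  by_cases hc : caps.getD ((lo + hi) / 2) 0 < x
  · rw [if_pos hc, if_pos hc]
    exact pvAux_congr _ _ caps x _ hi (by omega) (by omega)
  · rw [if_neg hc, if_neg hc]
    exact pvAux_congr _ _ caps x lo _ (by omega) (by omega)

theorem pvBisect_refl (caps : List Int) (x : Int) (lo : Nat) :
    pvBisectLeft caps x lo lo = lo := by
  unfold pvBisectLeft
  rw [Nat.sub_self]
  rfl

theorem pvCore (n : Int) :
    pvScanA [(1, 25), (2, 47), (3, 77), (4, 114), (5, 154),
     (6, 195), (7, 224), (8, 279), (9, 335), (10, 395)] n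
      = min ((pvBisectLeft pvCaps n 0 pvCaps.length : Int) + 1) 10 := by
  have e : ∀ (lo hi : Nat), lo < hi → pvBisectLeft pvCaps n lo hi =
      (if pvCaps.getD ((lo + hi) / 2) 0 < n then pvBisectLeft pvCaps n ((lo + hi) / 2 + 1) hi
       else pvBisectLeft pvCaps n lo ((lo + hi) / 2)) :=
    fun lo hi h => pvBisect_step pvCaps n lo hi h
  have e0 : ∀ (lo : Nat), pvBisectLeft pvCaps n lo lo = lo :=
    fun lo => pvBisect_refl pvCaps n lo
  rw [show pvCaps.length = 10 from rfl]
  rcases (by omega : n ≤ 25 ∨ 25 < n) with h0 | h0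
  · simp only [pvScanA]
    rw [if_pos (by omega)]
    rw [e 0 10 (by omega), show pvCaps.getD 5 0 = 195 from rfl, if_neg (by omega)]
    rw [e 0 5 (by omega), show pvCaps.getD 2 0 = 77 from rfl, if_neg (by omega)]
    rw [e 0 2 (by omega), show pvCaps.getD 1 0 = 47 from rfl, if_neg (by omega)]
    rw [e 0 1 (by omega), show pvCaps.getD 0 0 = 25 from rfl, if_neg (by omega)]
    rw [e0 0]
    norm_num
  rcases (by omega : n ≤ 47 ∨ 47 < n) with h1 | h1
  · simp only [pvScanA]
    rw [if_neg (by omega), if_pos (by omega)]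
    rw [e 0 10 (by omega), show pvCaps.getD 5 0 = 195 from rfl, if_neg (by omega)]
    rw [e 0 5 (by omega), show pvCaps.getD 2 0 = 77 from rfl, if_neg (by omega)]
    rw [e 0 2 (by omega), show pvCaps.getD 1 0 = 47 from rfl, if_neg (by omega)]
    rw [e 0 1 (by omega), show pvCaps.getD 0 0 = 25 from rfl, if_pos (by omega)]
    rw [e0 1]
    norm_num
  rcases (by omega : n ≤ 77 ∨ 77 < n) with h2 | h2
  · simp only [pvScanA]
    rw [if_neg (by omega), if_neg (by omega), if_pos (by omega)]
    rw [e 0 10 (by omega), show pvCaps.getD 5 0 = 195 from rfl, if_neg (by omega)]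
    rw [e 0 5 (by omega), show pvCaps.getD 2 0 = 77 from rfl, if_neg (by omega)]
    rw [e 0 2 (by omega), show pvCaps.getD 1 0 = 47 from rfl, if_pos (by omega)]
    rw [e0 2]
    norm_num
  rcases (by omega : n ≤ 114 ∨ 114 < n) with h3 | h3
  · simp only [pvScanA]
    rw [if_neg (by omega), if_neg (by omega), if_neg (by omega), if_pos (by omega)]
    rw [e 0 10 (by omega), show pvCaps.getD 5 0 = 195 from rfl, if_neg (by omega)]
    rw [e 0 5 (by omega), show pvCaps.getD 2 0 = 77 from rfl, if_pos (by omega)]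
    rw [e 3 5 (by omega), show pvCaps.getD 4 0 = 154 from rfl, if_neg (by omega)]
    rw [e 3 4 (by omega), show pvCaps.getD 3 0 = 114 from rfl, if_neg (by omega)]
    rw [e0 3]
    norm_num
  rcases (by omega : n ≤ 154 ∨ 154 < n) with h4 | h4
  · simp only [pvScanA]
    rw [if_neg (by omega), if_neg (by omega), if_neg (by omega), if_neg (by omega), if_pos (by omega)]
    rw [e 0 10 (by omega), show pvCaps.getD 5 0 = 195 from rfl, if_neg (by omega)]
    rw [e 0 5 (by omega), show pvCaps.getD 2 0 = 77 from rfl, if_pos (by omega)]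
    rw [e 3 5 (by omega), show pvCaps.getD 4 0 = 154 from rfl, if_neg (by omega)]
    rw [e 3 4 (by omega), show pvCaps.getD 3 0 = 114 from rfl, if_pos (by omega)]
    rw [e0 4]
    norm_num
  rcases (by omega : n ≤ 195 ∨ 195 < n) with h5 | h5
  · simp only [pvScanA]
    rw [if_neg (by omega), if_neg (by omega), if_neg (by omega), if_neg (by omega), if_neg (by omega), if_pos (by omega)]
    rw [e 0 10 (by omega), show pvCaps.getD 5 0 = 195 from rfl, if_neg (by omega)]
    rw [e 0 5 (by omega), show pvCaps.getD 2 0 = 77 from rfl, if_pos (by omega)]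
    rw [e 3 5 (by omega), show pvCaps.getD 4 0 = 154 from rfl, if_pos (by omega)]
    rw [e0 5]
    norm_num
  rcases (by omega : n ≤ 224 ∨ 224 < n) with h6 | h6
  · simp only [pvScanA]
    rw [if_neg (by omega), if_neg (by omega), if_neg (by omega), if_neg (by omega), if_neg (by omega), if_neg (by omega), if_pos (by omega)]
    rw [e 0 10 (by omega), show pvCaps.getD 5 0 = 195 from rfl, if_pos (by omega)]
    rw [e 6 10 (by omega), show pvCaps.getD 8 0 = 335 from rfl, if_neg (by omega)]
    rw [e 6 8 (by omega), show pvCaps.getD 7 0 = 279 from rfl, if_neg (by omega)]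
    rw [e 6 7 (by omega), show pvCaps.getD 6 0 = 224 from rfl, if_neg (by omega)]
    rw [e0 6]
    norm_num
  rcases (by omega : n ≤ 279 ∨ 279 < n) with h7 | h7
  · simp only [pvScanA]
    rw [if_neg (by omega), if_neg (by omega), if_neg (by omega), if_neg (by omega), if_neg (by omega), if_neg (by omega), if_neg (by omega), if_pos (by omega)]
    rw [e 0 10 (by omega), show pvCaps.getD 5 0 = 195 from rfl, if_pos (by omega)]
    rw [e 6 10 (by omega), show pvCaps.getD 8 0 = 335 from rfl, if_neg (by omega)]
    rw [e 6 8 (by omega), show pvCaps.getD 7 0 = 279 from rfl, if_neg (by omega)]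
    rw [e 6 7 (by omega), show pvCaps.getD 6 0 = 224 from rfl, if_pos (by omega)]
    rw [e0 7]
    norm_num
  rcases (by omega : n ≤ 335 ∨ 335 < n) with h8 | h8
  · simp only [pvScanA]
    rw [if_neg (by omega), if_neg (by omega), if_neg (by omega), if_neg (by omega), if_neg (by omega), if_neg (by omega), if_neg (by omega), if_neg (by omega), if_pos (by omega)]
    rw [e 0 10 (by omega), show pvCaps.getD 5 0 = 195 from rfl, if_pos (by omega)]
    rw [e 6 10 (by omega), show pvCaps.getD 8 0 = 335 from rfl, if_neg (by omega)]
    rw [e 6 8 (by omega), show pvCaps.getD 7 0 = 279 from rfl, if_pos (by omega)]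
    rw [e0 8]
    norm_num
  rcases (by omega : n ≤ 395 ∨ 395 < n) with h9 | h9
  · simp only [pvScanA]
    rw [if_neg (by omega), if_neg (by omega), if_neg (by omega), if_neg (by omega), if_neg (by omega), if_neg (by omega), if_neg (by omega), if_neg (by omega), if_neg (by omega), if_pos (by omega)]
    rw [e 0 10 (by omega), show pvCaps.getD 5 0 = 195 from rfl, if_pos (by omega)]
    rw [e 6 10 (by omega), show pvCaps.getD 8 0 = 335 from rfl, if_pos (by omega)]
    rw [e 9 10 (by omega), show pvCaps.getD 9 0 = 395 from rfl, if_neg (by omega)]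
    rw [e0 9]
    norm_num
  simp only [pvScanA]
  rw [if_neg (by omega), if_neg (by omega), if_neg (by omega), if_neg (by omega), if_neg (by omega), if_neg (by omega), if_neg (by omega), if_neg (by omega), if_neg (by omega), if_neg (by omega)]
  rw [e 0 10 (by omega), show pvCaps.getD 5 0 = 195 from rfl, if_pos (by omega)]
  rw [e 6 10 (by omega), show pvCaps.getD 8 0 = 335 from rfl, if_pos (by omega)]
  rw [e 9 10 (by omega), show pvCaps.getD 9 0 = 395 from rfl, if_pos (by omega)]
  rw [e0 10]
  norm_num

theorem calculate_optimal_version_py_spec : Claim_equal_calculate_optimal_version_py := by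
  intro data _
  unfold Spec_calculate_optimal_version_py calculate_optimal_version_py calculate_optimal_version_py_alt
  exact pvCore _
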